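-- pv_equiv track=rewrite | github.com/inaciovasquez2020/overlap-rigidity-counterexamples | scripts/star_of_triangles.py | star_of_triangles
-- ===== SOURCE A (Python) =====
-- def star_of_triangles(m):
--     # vertex 0 is the hub
--     adj = {0: []}
--     v = 1
--     for i in range(m):
--         a, b = v, v+1
--         adj.setdefault(a, [])
--         adj.setdefault(b, [])
--         adj[0].extend([a, b])
--         adj[a].extend([0, b])
--         adj[b].extend([0, a])
--         v += 2
--     return adj
-- ===== SOURCE B (Python) =====
-- def star_of_triangles(m):
--     # closed-form hub list plus one parity pass over the triangle vertices
--     n = max(m, 0)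
--     adj = {0: list(range(1, 2 * n + 1))}
--     for v in range(1, 2 * n + 1):
--         adj[v] = [0, v + 1 if v % 2 == 1 else v - 1]
--     return adj
-- ===== Notes on version B (the rewrite author's own statement) =====
-- stated objective: simpler
-- what changed: Replaces the incremental dict-growing loop (setdefault + three extends per triangle) with a closed-form hub adjacency list range(1,2m+1) plus a single parity pass assigning each triangle vertex its fixed two-element list [0, partner].
import Mathlib
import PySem

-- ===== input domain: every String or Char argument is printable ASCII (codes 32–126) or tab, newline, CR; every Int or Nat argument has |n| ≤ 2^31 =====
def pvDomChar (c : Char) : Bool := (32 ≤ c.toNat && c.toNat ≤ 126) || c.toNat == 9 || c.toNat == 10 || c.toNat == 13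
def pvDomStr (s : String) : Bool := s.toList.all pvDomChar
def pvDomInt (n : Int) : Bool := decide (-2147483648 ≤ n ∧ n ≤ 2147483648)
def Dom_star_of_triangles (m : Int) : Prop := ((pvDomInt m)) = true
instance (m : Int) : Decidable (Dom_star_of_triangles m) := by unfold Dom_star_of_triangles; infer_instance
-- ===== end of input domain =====

-- B replaces A's incremental dict building (setdefault + three extends per triangle) by a
-- closed-form hub list plus one parity pass; objective: simpler.

-- ===== PORT A =====
-- loop body of A's 'for i in range(m)': state is (adj, v).
-- adj[x].extend(xs) is ported as modify x [] (· ++ xs): the key is always present when A runs it,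
-- so the default [] is never used and this is exact.
def stepA (st : PySem.Dict Int (List Int) × Int) (_i : Int) :
    PySem.Dict Int (List Int) × Int :=
  let adj := st.1
  let v := st.2
  let a := v
  let b := v + 1
  let adj := adj.setdefault a []
  let adj := adj.setdefault b []
  let adj := adj.modify 0 [] (fun l => l ++ [a, b])
  let adj := adj.modify a [] (fun l => l ++ [0, b])
  let adj := adj.modify b [] (fun l => l ++ [0, a])
  (adj, v + 2)

def star_of_triangles (m : Int) : List (Int × List Int) :=
  let init : PySem.Dict Int (List Int) := PySem.Dict.mk [(0, [])]
  let res := (PySem.List.pyRange 0 m 1).foldl stepA (init, 1)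
  res.1.items

-- ===== PORT B =====
def star_of_triangles_alt (m : Int) : List (Int × List Int) :=
  let n := max m 0
  let rng := PySem.List.pyRange 1 (2 * n + 1) 1
  let adj : PySem.Dict Int (List Int) := PySem.Dict.mk [(0, rng)]
  (rng.foldl
    (fun d v => d.insert v [0, if PySem.Int.mod v 2 == 1 then v + 1 else v - 1]) adj).items

-- ===== PRECONDITION & SPEC =====
def Spec_star_of_triangles (m : Int) (out : List (Int × List Int)) : Prop := out = star_of_triangles_alt m
instance (m : Int) (out : List (Int × List Int)) : Decidable (Spec_star_of_triangles m out) := by unfold Spec_star_of_triangles; infer_instance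

-- ===== CLAIM (what is proved, stated in full; the proofs are below) =====
def Claim_equal_star_of_triangles : Prop := ∀ (m : Int), Dom_star_of_triangles m → Spec_star_of_triangles m (star_of_triangles m)

-- ===== LEMMAS AND PROOFS =====

-- the per-vertex adjacency entry both programs end with
def entryT (v : Int) : Int × List Int :=
  (v, [0, if PySem.Int.mod v 2 == 1 then v + 1 else v - 1])

-- the items list both programs end with, as a function of the number k of completed triangles
def formItems (k : Nat) : List (Int × List Int) :=
  (0, PySem.List.pyRange 1 (2 * (k : Int) + 1) 1) ::
    (PySem.List.pyRange 1 (2 * (k : Int) + 1) 1).map entryT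

lemma formItems_keys (k : Nat) (p : Int × List Int) (hp : p ∈ formItems k) :
    p.1 = 0 ∨ (1 ≤ p.1 ∧ p.1 < 2 * (k : Int) + 1) := by
  unfold formItems at hp
  rcases List.mem_cons.1 hp with hp | hp
  · left; simp [hp]
  · right
    rcases List.mem_map.1 hp with ⟨v, hv, rfl⟩
    exact (PySem.List.mem_pyRange_one).1 hv

lemma find_entry_none (k : Nat) (x : Int) (hx : ¬ (1 ≤ x ∧ x < 2 * (k : Int) + 1)) :
    List.find? (fun p => p.1 == x) ((PySem.List.pyRange 1 (2 * (k : Int) + 1) 1).map entryT)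
      = none := by
  push Not at hx
  rw [List.find?_eq_none]
  intro p hp
  rcases List.mem_map.1 hp with ⟨v, hv, rfl⟩
  have h := (PySem.List.mem_pyRange_one).1 hv
  have hne : v ≠ x := by omega
  simp [entryT, hne]

lemma stepA_form (k : Nat) (i : Int) :
    stepA (PySem.Dict.mk (formItems k), 2 * (k : Int) + 1) i
      = (PySem.Dict.mk (formItems (k + 1)), 2 * (k : Int) + 3) := by
  have hx1 : ¬ (1 ≤ (2 * (k : Int) + 1) ∧ (2 * (k : Int) + 1) < 2 * (k : Int) + 1) := by omega
  have hx2 : ¬ (1 ≤ (2 * (k : Int) + 2) ∧ (2 * (k : Int) + 2) < 2 * (k : Int) + 1) := by omega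
  have hx0 : ¬ (1 ≤ (0 : Int) ∧ (0 : Int) < 2 * (k : Int) + 1) := by omega
  -- the two fresh keys are absent
  have hc1 : (PySem.Dict.mk (formItems k)).contains (2 * (k : Int) + 1) = false := by
    simp only [PySem.Dict.contains, List.any_eq_false]
    intro p hp
    have h := formItems_keys k p hp
    simp only [beq_iff_eq]
    omega
  have hc2 : (PySem.Dict.mk (formItems k ++ [(2 * (k : Int) + 1, [])])).contains
      (2 * (k : Int) + 2) = false := by
    simp only [PySem.Dict.contains, List.any_eq_false]
    intro p hp
    rcases List.mem_append.1 hp with hp | hp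
    · have h := formItems_keys k p hp
      simp only [beq_iff_eq]
      omega
    · simp only [List.mem_singleton] at hp
      subst hp
      simp only [beq_iff_eq]
      omega
  -- the two setdefaults append fresh empty entries
  have e1 : (PySem.Dict.mk (formItems k)).setdefault (2 * (k : Int) + 1) []
      = PySem.Dict.mk (formItems k ++ [(2 * (k : Int) + 1, [])]) := by
    simp [PySem.Dict.setdefault, hc1]
  have e2 : (PySem.Dict.mk (formItems k ++ [(2 * (k : Int) + 1, [])])).setdefault
        (2 * (k : Int) + 2) []
      = PySem.Dict.mk (formItems k ++ [(2 * (k : Int) + 1, [])] ++ [(2 * (k : Int) + 2, [])]) := by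
    simp [PySem.Dict.setdefault, hc2]
  have hA0 : ¬((2 * (k : Int) + 1) = 0) := by omega
  have hB0 : ¬((2 * (k : Int) + 2) = 0) := by omega
  have h0A : ¬((0 : Int) = 2 * (k : Int) + 1) := by omega
  have h0B : ¬((0 : Int) = 2 * (k : Int) + 2) := by omega
  have hBA : ¬((2 * (k : Int) + 2) = 2 * (k : Int) + 1) := by omega
  have hAB : ¬((2 * (k : Int) + 1) = 2 * (k : Int) + 2) := by omega
  -- extend the hub's list: modify 0
  have e3 : (PySem.Dict.mk (formItems k ++ [(2 * (k : Int) + 1, [])] ++ [(2 * (k : Int) + 2, [])])).modify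
        0 [] (fun l => l ++ [2 * (k : Int) + 1, 2 * (k : Int) + 2])
      = PySem.Dict.mk ((0, PySem.List.pyRange 1 (2 * (k : Int) + 1) 1
            ++ [2 * (k : Int) + 1, 2 * (k : Int) + 2])
          :: ((PySem.List.pyRange 1 (2 * (k : Int) + 1) 1).map entryT
            ++ [(2 * (k : Int) + 1, []), (2 * (k : Int) + 2, [])])) := by
    simp [PySem.Dict.modify, PySem.Dict.getD, PySem.Dict.get?, PySem.Dict.insert,
      PySem.Dict.contains, formItems, hA0, hB0]
    intro a ha1 ha2 h
    simp [entryT] at h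
    omega
  have e4 : (PySem.Dict.mk ((0, PySem.List.pyRange 1 (2 * (k : Int) + 1) 1
            ++ [2 * (k : Int) + 1, 2 * (k : Int) + 2])
          :: ((PySem.List.pyRange 1 (2 * (k : Int) + 1) 1).map entryT
            ++ [(2 * (k : Int) + 1, []), (2 * (k : Int) + 2, [])]))).modify
        (2 * (k : Int) + 1) [] (fun l => l ++ [0, 2 * (k : Int) + 2])
      = PySem.Dict.mk ((0, PySem.List.pyRange 1 (2 * (k : Int) + 1) 1
            ++ [2 * (k : Int) + 1, 2 * (k : Int) + 2])
          :: ((PySem.List.pyRange 1 (2 * (k : Int) + 1) 1).map entryT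
            ++ [(2 * (k : Int) + 1, [0, 2 * (k : Int) + 2]), (2 * (k : Int) + 2, [])])) := by
    simp [PySem.Dict.modify, PySem.Dict.getD, PySem.Dict.get?, PySem.Dict.insert,
      PySem.Dict.contains, List.find?_append, find_entry_none k _ hx1, h0A, hBA]
    intro a ha1 ha2 h
    simp [entryT] at h
    omega
  have e5 : (PySem.Dict.mk ((0, PySem.List.pyRange 1 (2 * (k : Int) + 1) 1
            ++ [2 * (k : Int) + 1, 2 * (k : Int) + 2])
          :: ((PySem.List.pyRange 1 (2 * (k : Int) + 1) 1).map entryT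
            ++ [(2 * (k : Int) + 1, [0, 2 * (k : Int) + 2]), (2 * (k : Int) + 2, [])]))).modify
        (2 * (k : Int) + 2) [] (fun l => l ++ [0, 2 * (k : Int) + 1])
      = PySem.Dict.mk ((0, PySem.List.pyRange 1 (2 * (k : Int) + 1) 1
            ++ [2 * (k : Int) + 1, 2 * (k : Int) + 2])
          :: ((PySem.List.pyRange 1 (2 * (k : Int) + 1) 1).map entryT
            ++ [(2 * (k : Int) + 1, [0, 2 * (k : Int) + 2]),
                (2 * (k : Int) + 2, [0, 2 * (k : Int) + 1])])) := by
    simp [PySem.Dict.modify, PySem.Dict.getD, PySem.Dict.get?, PySem.Dict.insert,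
      PySem.Dict.contains, List.find?_append, find_entry_none k _ hx2, h0B, hAB]
    intro a ha1 ha2 h
    simp [entryT] at h
    omega
  have hrng' : PySem.List.pyRange 1 (2 * ((k : Int) + 1) + 1) 1
      = PySem.List.pyRange 1 (2 * (k : Int) + 1) 1 ++ [2 * (k : Int) + 1, 2 * (k : Int) + 2] := by
    rw [show (2 * ((k : Int) + 1) + 1) = (2 * (k : Int) + 2) + 1 from by ring,
      PySem.List.pyRange_one_succ_right (by omega),
      show PySem.List.pyRange 1 (2 * (k : Int) + 2) 1
          = PySem.List.pyRange 1 (2 * (k : Int) + 1) 1 ++ [2 * (k : Int) + 1] from by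
        rw [show (2 * (k : Int) + 2) = 2 * (k : Int) + 1 + 1 from by ring,
          PySem.List.pyRange_one_succ_right (by omega)]]
    simp
  have hform : formItems (k + 1)
      = (0, PySem.List.pyRange 1 (2 * (k : Int) + 1) 1
            ++ [2 * (k : Int) + 1, 2 * (k : Int) + 2])
          :: ((PySem.List.pyRange 1 (2 * (k : Int) + 1) 1).map entryT
            ++ [(2 * (k : Int) + 1, [0, 2 * (k : Int) + 2]),
                (2 * (k : Int) + 2, [0, 2 * (k : Int) + 1])]) := by
    simp [formItems, hrng', entryT]
    omega
  unfold stepA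
  simp only [show (2 * (k : Int) + 1 + 1) = 2 * (k : Int) + 2 from by ring,
    show (2 * (k : Int) + 1 + 2) = 2 * (k : Int) + 3 from by ring, e1, e2, e3, e4, e5, hform]

lemma loopA (k : Nat) :
    (PySem.List.pyRange 0 (k : Int) 1).foldl stepA (PySem.Dict.mk [(0, [])], 1)
      = (PySem.Dict.mk (formItems k), 2 * (k : Int) + 1) := by
  induction k with
  | zero =>
      simp [PySem.List.pyRange_one_eq_nil (by omega : (0:Int) ≤ 0), formItems]
  | succ k ih =>
      have hsplit : PySem.List.pyRange 0 ((k : Int) + 1) 1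
          = PySem.List.pyRange 0 (k : Int) 1 ++ [(k : Int)] :=
        PySem.List.pyRange_one_succ_right (by omega)
      push_cast
      rw [hsplit, List.foldl_append, ih]
      simpa using stepA_form k (k : Int)

lemma loopB (k : Nat) :
    ((PySem.List.pyRange 1 (2 * (k : Int) + 1) 1).foldl
        (fun d v => d.insert v [0, if PySem.Int.mod v 2 == 1 then v + 1 else v - 1])
        (PySem.Dict.mk [(0, PySem.List.pyRange 1 (2 * (k : Int) + 1) 1)])).items
      = formItems k := by
  have h := PySem.Dict.items_foldl_insert_fresh
    (PySem.List.pyRange 1 (2 * (k : Int) + 1) 1) (fun v => v)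
    (fun v => [0, if PySem.Int.mod v 2 == 1 then v + 1 else v - 1])
    (PySem.Dict.mk [(0, PySem.List.pyRange 1 (2 * (k : Int) + 1) 1)])
    (by
      intro v hv
      have h := (PySem.List.mem_pyRange_one).1 hv
      simp [PySem.Dict.contains]
      omega)
    (by simpa using PySem.List.nodup_pyRange_one 1 (2 * (k : Int) + 1))
  rw [h]
  simp [formItems, entryT]

lemma pyRange_toNat (m : Int) :
    PySem.List.pyRange 0 m 1 = PySem.List.pyRange 0 (m.toNat : Int) 1 := by
  rcases le_or_gt 0 m with h | h
  · rw [Int.toNat_of_nonneg h]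
  · rw [PySem.List.pyRange_one_eq_nil (by omega), PySem.List.pyRange_one_eq_nil (by omega)]

-- ===== VERDICT (by name: the statement is the Claim_ definition above) =====
theorem star_of_triangles_spec : Claim_equal_star_of_triangles := by
  intro m _
  show ((PySem.List.pyRange 0 m 1).foldl stepA (PySem.Dict.mk [(0, [])], 1)).1.items
      = ((PySem.List.pyRange 1 (2 * (max m 0) + 1) 1).foldl
          (fun d v => d.insert v [0, if PySem.Int.mod v 2 == 1 then v + 1 else v - 1])
          (PySem.Dict.mk [(0, PySem.List.pyRange 1 (2 * (max m 0) + 1) 1)])).items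
  have hmax : max m 0 = (m.toNat : Int) := by omega
  rw [hmax, pyRange_toNat, loopA, loopB]
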